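-- pv_equiv track=rewrite | github.com/barryw/NovaVM | tools/xml2mml.py | _apply_transpose
-- ===== SOURCE A (Python) =====
-- _SEMI = {"c": 0, "d": 2, "e": 4, "f": 5, "g": 7, "a": 9, "b": 11}
--
-- def _apply_transpose(letter: str, octave: int, accidental: int, chromatic: int) -> tuple[str, int, int]:
--     """Transpose a note by a chromatic interval."""
--     if chromatic == 0:
--         return letter, octave, accidental
--     semi = _SEMI.get(letter, 0) + accidental + chromatic
--     octave_adj = semi // 12
--     semi = semi % 12
--     new_octave = octave + octave_adj
--     # Find best letter match
--     best_letter, best_acc = "c", 0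
--     for l, s in _SEMI.items():
--         if semi - s == 0:
--             best_letter, best_acc = l, 0
--             break
--         elif semi - s == 1:
--             best_letter, best_acc = l, 1
--         elif semi - s == -1 and best_acc != 0:
--             best_letter, best_acc = l, -1
--     return best_letter, new_octave, best_acc
-- ===== SOURCE B (Python) =====
-- _SEMI = {"c": 0, "d": 2, "e": 4, "f": 5, "g": 7, "a": 9, "b": 11}
--
-- # semitone -> (letter, accidental), flats chosen exactly where A's scan chooses them
-- _SPELL = [("c", 0), ("d", -1), ("d", 0), ("e", -1), ("e", 0), ("f", 0),
--           ("g", -1), ("g", 0), ("a", -1), ("a", 0), ("b", -1), ("b", 0)]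
--
-- def _apply_transpose(letter: str, octave: int, accidental: int, chromatic: int) -> tuple[str, int, int]:
--     if chromatic == 0:
--         return letter, octave, accidental
--     semi = _SEMI.get(letter, 0) + accidental + chromatic
--     l, acc = _SPELL[semi % 12]
--     return l, octave + semi // 12, acc
-- ===== Notes on version B (the rewrite author's own statement) =====
-- stated objective: simpler
-- what changed: Replaces A's 7-iteration best-match scan over _SEMI (with break and accidental tie-breaking state) by a single indexed lookup into a precomputed 12-entry spelling table.
import Mathlib
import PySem

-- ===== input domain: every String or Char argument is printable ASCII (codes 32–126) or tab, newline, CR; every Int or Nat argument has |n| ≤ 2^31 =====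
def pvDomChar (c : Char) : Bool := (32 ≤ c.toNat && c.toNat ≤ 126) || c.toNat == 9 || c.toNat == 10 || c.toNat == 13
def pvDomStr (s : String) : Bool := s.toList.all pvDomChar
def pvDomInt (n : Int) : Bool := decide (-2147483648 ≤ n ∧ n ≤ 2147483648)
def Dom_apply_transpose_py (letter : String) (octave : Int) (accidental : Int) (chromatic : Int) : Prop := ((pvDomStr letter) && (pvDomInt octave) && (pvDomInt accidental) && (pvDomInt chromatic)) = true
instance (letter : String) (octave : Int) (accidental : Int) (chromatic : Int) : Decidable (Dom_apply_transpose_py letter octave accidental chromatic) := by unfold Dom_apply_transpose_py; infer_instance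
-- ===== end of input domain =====

-- B replaces A's best-match scan over _SEMI by one lookup in a precomputed 12-entry spelling table (simpler).

-- ===== PORT A =====
-- _SEMI as an association list (insertion order of the Python dict)
def pvSemiList : List (String × Int) :=
  [("c", 0), ("d", 2), ("e", 4), ("f", 5), ("g", 7), ("a", 9), ("b", 11)]

-- the 'for l, s in _SEMI.items()' loop with its break and best_acc state
def pvFindBest : List (String × Int) → Int → String × Int → String × Int
  | [], _, best => best
  | (l, s) :: rest, semi, best =>
    if semi - s = 0 then (l, 0)
    else if semi - s = 1 then pvFindBest rest semi (l, 1)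
    else if semi - s = -1 ∧ best.2 ≠ 0 then pvFindBest rest semi (l, -1)
    else pvFindBest rest semi best

def apply_transpose_py (letter : String) (octave : Int) (accidental : Int) (chromatic : Int) : String × Int × Int :=
  if chromatic = 0 then (letter, octave, accidental)
  else
    let semi := PySem.Dict.getD (PySem.Dict.ofList pvSemiList) letter 0 + accidental + chromatic
    let octave_adj := PySem.Int.floordiv semi 12
    let semi2 := PySem.Int.mod semi 12
    let best := pvFindBest pvSemiList semi2 ("c", 0)
    (best.1, octave + octave_adj, best.2)

-- ===== PORT B =====
-- _SPELL: semitone -> (letter, accidental)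
def pvSpell : List (String × Int) :=
  [("c", 0), ("d", -1), ("d", 0), ("e", -1), ("e", 0), ("f", 0),
   ("g", -1), ("g", 0), ("a", -1), ("a", 0), ("b", -1), ("b", 0)]

def apply_transpose_py_alt (letter : String) (octave : Int) (accidental : Int) (chromatic : Int) : String × Int × Int :=
  if chromatic = 0 then (letter, octave, accidental)
  else
    let semi := PySem.Dict.getD (PySem.Dict.ofList pvSemiList) letter 0 + accidental + chromatic
    let p := (PySem.List.pyGet? pvSpell (PySem.Int.mod semi 12)).getD ("c", 0)
    (p.1, octave + PySem.Int.floordiv semi 12, p.2)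

-- ===== PRECONDITION & SPEC =====
def Spec_apply_transpose_py (letter : String) (octave : Int) (accidental : Int) (chromatic : Int) (out : String × Int × Int) : Prop := out = apply_transpose_py_alt letter octave accidental chromatic
instance (letter : String) (octave : Int) (accidental : Int) (chromatic : Int) (out : String × Int × Int) : Decidable (Spec_apply_transpose_py letter octave accidental chromatic out) := by unfold Spec_apply_transpose_py; infer_instance

-- ===== CLAIM (what is proved, stated in full; the proofs are below) =====
def Claim_equal_apply_transpose_py : Prop := ∀ (letter : String) (octave : Int) (accidental : Int) (chromatic : Int), Dom_apply_transpose_py letter octave accidental chromatic → Spec_apply_transpose_py letter octave accidental chromatic (apply_transpose_py letter octave accidental chromatic)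

-- ===== LEMMAS AND PROOFS =====

-- For every residue 0 ≤ m < 12, A's scan and B's table agree.
theorem pv_scan_eq_table (m : Int) (h0 : 0 ≤ m) (h12 : m < 12) :
    pvFindBest pvSemiList m ("c", 0) = (PySem.List.pyGet? pvSpell m).getD ("c", 0) := by
  interval_cases m <;> decide

theorem pv_mod_bounds (a : Int) : 0 ≤ PySem.Int.mod a 12 ∧ PySem.Int.mod a 12 < 12 := by
  rw [PySem.Int.mod_eq_emod_of_pos (by norm_num)]
  exact ⟨Int.emod_nonneg a (by norm_num), Int.emod_lt_of_pos a (by norm_num)⟩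

-- ===== VERDICT (by name: the statement is the Claim_ definition above) =====
theorem apply_transpose_py_spec : Claim_equal_apply_transpose_py := by
  intro letter octave accidental chromatic _
  unfold Spec_apply_transpose_py apply_transpose_py apply_transpose_py_alt
  by_cases hc : chromatic = 0
  · simp [hc]
  · simp only [hc, if_false]
    set semi := PySem.Dict.getD (PySem.Dict.ofList pvSemiList) letter 0 + accidental + chromatic
    obtain ⟨h0, h12⟩ := pv_mod_bounds semi
    rw [pv_scan_eq_table _ h0 h12]
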